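-- pv_equiv track=rewrite | github.com/wyjistest/LongTarget-exact-sim | scripts/summarize_longtarget_sim_ordered_candidate_maintenance_budget.py | aggregate_shape_confidence
-- ===== SOURCE A (Python) =====
-- ORDERED_SHAPE_CONFIDENCE_ORDER = [
--     "fallback_conservative",
--     "coarse",
--     "event_level",
--     "validated",
-- ]
--
-- def unique_strings(rows, key):
--     values = {
--         row["shape"].get(key)
--         for row in rows
--         if isinstance(row["shape"].get(key), str) and row["shape"].get(key)
--     }
--     return sorted(values)
--
-- def aggregate_shape_confidence(rows):
--     values = unique_strings(rows, "ordered_shape_confidence")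
--     if not values:
--         return None
--     ranks = {
--         value: index
--         for index, value in enumerate(ORDERED_SHAPE_CONFIDENCE_ORDER)
--     }
--     known = [value for value in values if value in ranks]
--     if not known:
--         return values[0]
--     return min(known, key=lambda value: ranks[value])
-- ===== SOURCE B (Python) =====
-- ORDERED_SHAPE_CONFIDENCE_ORDER = [
--     "fallback_conservative",
--     "coarse",
--     "event_level",
--     "validated",
-- ]
--
-- def aggregate_shape_confidence(rows):
--     vals = set()
--     for row in rows:
--         v = row["shape"].get("ordered_shape_confidence")
--         if isinstance(v, str) and v:
--             vals.add(v)
--     if not vals: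
--         return None
--     for c in ORDERED_SHAPE_CONFIDENCE_ORDER:
--         if c in vals:
--             return c
--     return min(vals)
-- ===== Notes on version B (the rewrite author's own statement) =====
-- stated objective: simpler
-- what changed: B builds the set of valid confidence strings in one pass and returns the first ORDERED_SHAPE_CONFIDENCE_ORDER entry present in it (falling back to min of the set), replacing A's sort, ranks dict, known-list filter and min-by-rank.
import Mathlib
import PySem

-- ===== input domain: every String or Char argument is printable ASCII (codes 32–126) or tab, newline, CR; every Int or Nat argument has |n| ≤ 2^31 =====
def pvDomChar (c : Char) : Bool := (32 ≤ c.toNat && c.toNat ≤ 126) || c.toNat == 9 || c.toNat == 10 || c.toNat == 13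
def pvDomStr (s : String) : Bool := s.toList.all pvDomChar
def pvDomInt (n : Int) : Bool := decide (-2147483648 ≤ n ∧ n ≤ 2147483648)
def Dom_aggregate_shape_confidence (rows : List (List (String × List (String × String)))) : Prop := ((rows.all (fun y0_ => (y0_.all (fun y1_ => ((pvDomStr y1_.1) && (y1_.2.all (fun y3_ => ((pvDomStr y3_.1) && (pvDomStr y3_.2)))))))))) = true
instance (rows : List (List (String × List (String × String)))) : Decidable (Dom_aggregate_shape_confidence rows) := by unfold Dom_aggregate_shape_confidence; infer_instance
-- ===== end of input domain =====

-- B replaces sort + ranks dict + known list + min-by-rank with a single set-building pass,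
-- a scan of the priority order for the first present value, and a plain min fallback (objective: simpler).

-- ===== PORT A =====
def pvOrder : List String :=
  ["fallback_conservative", "coarse", "event_level", "validated"]

-- row["shape"].get("ordered_shape_confidence"), filtered to truthy strings
-- (identical expression in both Pythons; row["shape"] KeyError is excluded by Pre_, here getD []).
def pvExtract (row : List (String × List (String × String))) : Option String :=
  match PySem.Dict.get? (PySem.Dict.mk ((PySem.Dict.get? (PySem.Dict.mk row) "shape").getD [])) "ordered_shape_confidence" with
  | some v => if v ≠ "" then some v else none
  | none => none

def pvUniqueStrings (rows : List (List (String × List (String × String)))) : List String :=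
  PySem.List.sorted (PySem.Set.ofList (rows.filterMap pvExtract)) (fun x => x) false

def pvRanks : PySem.Dict String Int :=
  (PySem.List.enumerate pvOrder).foldl (fun d p => d.insert p.2 p.1) PySem.Dict.empty

def aggregate_shape_confidence (rows : List (List (String × List (String × String)))) : Option String :=
  match pvUniqueStrings rows with
  | [] => none
  | v0 :: vs =>
    let known := (v0 :: vs).filter (fun v => pvRanks.contains v)
    if known = [] then some v0
    else PySem.List.min? known (fun v => pvRanks.getD v 0)

-- ===== PORT B =====
def aggregate_shape_confidence_alt (rows : List (List (String × List (String × String)))) : Option String :=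
  let vals : PySem.Set String := rows.foldl (fun s row =>
    match pvExtract row with
    | some v => PySem.Set.add s v
    | none => s) PySem.Set.empty
  if vals = [] then none
  else
    match pvOrder.find? (fun c => PySem.Set.contains vals c) with
    | some c => some c
    | none => PySem.List.min? vals (fun x => x)

-- ===== PRECONDITION & SPEC =====
-- Pre_ excludes rows missing the "shape" key, on which the Python A (and B) raises KeyError.
def Pre_aggregate_shape_confidence (rows : List (List (String × List (String × String)))) : Prop :=
  ∀ row ∈ rows, (PySem.Dict.mk row).contains "shape" = true
instance (rows : List (List (String × List (String × String)))) : Decidable (Pre_aggregate_shape_confidence rows) := by unfold Pre_aggregate_shape_confidence; infer_instance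

def pvWitness_aggregate_shape_confidence : (List (List (String × List (String × String)))) :=
  [[("shape", [("ordered_shape_confidence", "coarse")])],
   [("shape", [("ordered_shape_confidence", "zzz")])]]

def Spec_aggregate_shape_confidence (rows : List (List (String × List (String × String)))) (out : Option String) : Prop := out = aggregate_shape_confidence_alt rows
instance (rows : List (List (String × List (String × String)))) (out : Option String) : Decidable (Spec_aggregate_shape_confidence rows out) := by unfold Spec_aggregate_shape_confidence; infer_instance

-- ===== CLAIM (what is proved, stated in full; the proofs are below) =====
def Claim_equal_aggregate_shape_confidence : Prop := ∀ (rows : List (List (String × List (String × String)))), Dom_aggregate_shape_confidence rows → Pre_aggregate_shape_confidence rows → Spec_aggregate_shape_confidence rows (aggregate_shape_confidence rows)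

-- ===== LEMMAS AND PROOFS =====

-- B's set-building loop is the ofList of the filterMapped valid values.
theorem pvFoldAdd_eq (l : List (List (String × List (String × String)))) (s : PySem.Set String) :
    l.foldl (fun s row => match pvExtract row with
      | some v => PySem.Set.add s v
      | none => s) s
      = (l.filterMap pvExtract).foldl PySem.Set.add s := by
  induction l generalizing s with
  | nil => rfl
  | cons hd tl ih => cases h : pvExtract hd <;> simp [h, ih]

theorem pvVals_eq (rows : List (List (String × List (String × String)))) :
    rows.foldl (fun s row => match pvExtract row with
      | some v => PySem.Set.add s v
      | none => s) PySem.Set.empty = PySem.Set.ofList (rows.filterMap pvExtract) := by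
  rw [PySem.Set.ofList_eq_foldl, show (PySem.Set.empty : PySem.Set String) = [] from rfl]
  exact pvFoldAdd_eq rows []

theorem pvRanks_eval : pvRanks = PySem.Dict.mk
    [("fallback_conservative", 0), ("coarse", 1), ("event_level", 2), ("validated", 3)] := by rfl

theorem pvRanks_contains_iff (v : String) : pvRanks.contains v = true ↔ v ∈ pvOrder := by
  rw [pvRanks_eval, PySem.Dict.contains_eq_decide_mem_keys]; simp [pvOrder]

-- a list min with a key that is uniquely minimised at c ∈ xs is c
theorem pvMin?_unique {α κ : Type} [LinearOrder κ] (xs : List α) (key : α → κ) (c : α)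
    (hc : c ∈ xs) (huniq : ∀ y ∈ xs, key y ≤ key c → y = c) :
    PySem.List.min? xs key = some c := by
  cases h : PySem.List.min? xs key with
  | none =>
    have := (PySem.List.min?_eq_none_iff xs key).mp h
    subst this; simp at hc
  | some m =>
    have hm := PySem.List.min?_mem h
    have hle := PySem.List.min?_isMin h c hc
    rw [huniq m hm hle]

-- the A-side branch on (sorted, filter, min-by-rank) returns c when c is the unique
-- rank-minimal element of S among pvOrder
theorem pvA_eq (S : List String) (v0 : String) (vs : List String)
    (hsort : PySem.List.sorted S (fun x => x) false = v0 :: vs)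
    (c : String) (hcS : c ∈ S) (hcO : c ∈ pvOrder)
    (huq : ∀ y ∈ pvOrder, y ∈ S → pvRanks.getD y 0 ≤ pvRanks.getD c 0 → y = c) :
    (if (v0 :: vs).filter (fun v => pvRanks.contains v) = [] then some v0
     else PySem.List.min? ((v0 :: vs).filter (fun v => pvRanks.contains v))
            (fun v => pvRanks.getD v 0)) = some c := by
  have hc_mem : c ∈ v0 :: vs := by
    rw [← hsort]; exact (PySem.List.mem_sorted S _ false c).mpr hcS
  have hc_known : c ∈ (v0 :: vs).filter (fun v => pvRanks.contains v) := by
    refine List.mem_filter.mpr ⟨hc_mem, ?_⟩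
    exact (pvRanks_contains_iff c).mpr hcO
  rw [if_neg (by intro h; rw [h] at hc_known; simp at hc_known)]
  apply pvMin?_unique _ _ c hc_known
  intro y hy hle
  obtain ⟨hy1, hy2⟩ := List.mem_filter.mp hy
  have hyS : y ∈ S := (PySem.List.mem_sorted S _ false y).mp (hsort ▸ hy1)
  exact huq y ((pvRanks_contains_iff y).mp hy2) hyS hle

theorem pvOrder_cases (y : String) (h : y ∈ pvOrder) :
    y = "fallback_conservative" ∨ y = "coarse" ∨ y = "event_level" ∨ y = "validated" := by
  simpa [pvOrder] using h

-- ===== VERDICT (by name: the statement is the Claim_ definition above) =====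
theorem aggregate_shape_confidence_spec : Claim_equal_aggregate_shape_confidence := by
  intro rows _ _
  show aggregate_shape_confidence rows = aggregate_shape_confidence_alt rows
  unfold aggregate_shape_confidence aggregate_shape_confidence_alt pvUniqueStrings
  rw [pvVals_eq]
  set S := PySem.Set.ofList (rows.filterMap pvExtract) with hSdef
  cases hsort : PySem.List.sorted S (fun x => x) false with
  | nil =>
    have hS : S = [] := (PySem.List.sorted_eq_nil_iff S _ false).mp hsort
    simp [hS]
  | cons v0 vs =>
    have hSne : ¬ S = [] := by
      intro h; rw [(PySem.List.sorted_eq_nil_iff S _ false).mpr h] at hsort; cases hsort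
    rw [if_neg hSne]
    show (if (v0 :: vs).filter (fun v => pvRanks.contains v) = [] then some v0
          else PySem.List.min? ((v0 :: vs).filter (fun v => pvRanks.contains v))
                 (fun v => pvRanks.getD v 0))
       = (match pvOrder.find? (fun c => PySem.Set.contains S c) with
          | some c => some c
          | none => PySem.List.min? S (fun x => x))
    have hv0S : v0 ∈ S := by
      have : v0 ∈ PySem.List.sorted S (fun x => x) false := by rw [hsort]; exact List.mem_cons_self
      exact (PySem.List.mem_sorted S _ false v0).mp this
    have hhead : ∀ y ∈ S, v0 ≤ y := by
      have := PySem.List.key_head_sorted_le (xs := S) (key := fun x => x) hsort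
      simpa using this
    by_cases h1 : "fallback_conservative" ∈ S
    · rw [show pvOrder.find? (fun c => PySem.Set.contains S c) = some "fallback_conservative" by
        simp [pvOrder, PySem.Set.contains, h1]]
      exact pvA_eq S v0 vs hsort _ h1 (by simp [pvOrder])
        (fun y hy hyS hle => by
          rcases pvOrder_cases y hy with h|h|h|h <;> subst h <;> first | rfl | (exfalso; revert hle; decide))
    · by_cases h2 : "coarse" ∈ S
      · rw [show pvOrder.find? (fun c => PySem.Set.contains S c) = some "coarse" by
          simp [pvOrder, List.find?, PySem.Set.contains, h1, h2]]
        exact pvA_eq S v0 vs hsort _ h2 (by simp [pvOrder])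
          (fun y hy hyS hle => by
            rcases pvOrder_cases y hy with h|h|h|h <;> subst h <;>
              first | rfl | (exact absurd hyS h1) | (exfalso; revert hle; decide))
      · by_cases h3 : "event_level" ∈ S
        · rw [show pvOrder.find? (fun c => PySem.Set.contains S c) = some "event_level" by
            simp [pvOrder, List.find?, PySem.Set.contains, h1, h2, h3]]
          exact pvA_eq S v0 vs hsort _ h3 (by simp [pvOrder])
            (fun y hy hyS hle => by
              rcases pvOrder_cases y hy with h|h|h|h <;> subst h <;>
                first | rfl | (exact absurd hyS h1) | (exact absurd hyS h2) | (exfalso; revert hle; decide))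
        · by_cases h4 : "validated" ∈ S
          · rw [show pvOrder.find? (fun c => PySem.Set.contains S c) = some "validated" by
              simp [pvOrder, List.find?, PySem.Set.contains, h1, h2, h3, h4]]
            exact pvA_eq S v0 vs hsort _ h4 (by simp [pvOrder])
              (fun y hy hyS hle => by
                rcases pvOrder_cases y hy with h|h|h|h <;> subst h <;>
                  first | rfl | (exact absurd hyS h1) | (exact absurd hyS h2) | (exact absurd hyS h3))
          · rw [show pvOrder.find? (fun c => PySem.Set.contains S c) = none by
              simp [pvOrder, List.find?, PySem.Set.contains, h1, h2, h3, h4]]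
            have hknown : (v0 :: vs).filter (fun v => pvRanks.contains v) = [] := by
              rw [List.filter_eq_nil_iff]
              intro y hy
              have hyS : y ∈ S := (PySem.List.mem_sorted S _ false y).mp (hsort ▸ hy)
              simp only [Bool.not_eq_true]
              cases hcont : pvRanks.contains y with
              | false => rfl
              | true =>
                rcases pvOrder_cases y ((pvRanks_contains_iff y).mp hcont) with h|h|h|h <;> subst h
                · exact absurd hyS h1
                · exact absurd hyS h2
                · exact absurd hyS h3
                · exact absurd hyS h4
            rw [if_pos hknown]
            have := pvMin?_unique S (fun x => x) v0 hv0S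
              (fun y hy hle => le_antisymm hle (hhead y hy))
            show some v0 = PySem.List.min? S (fun x => x)
            exact this.symm
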